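-- pv_equiv track=rewrite | github.com/the-puzzler/pygames | game/combat.py | apply_attack_to_defenses
-- ===== SOURCE A (Python) =====
-- def apply_attack_to_defenses(attackers, defenses):
--     """Apply attackers as 1 damage per attacker to defense towers.
--     Mutates defenses (list of dicts with x,y,hp). Returns (remaining_attackers, destroyed_positions, total_damage).
--     """
--     damage = 0
--     destroyed = []
--     if attackers <= 0 or not defenses:
--         return attackers, destroyed, damage
--     for t in list(defenses):
--         if attackers <= 0:
--             break
--         hit = min(attackers, t.get('hp', 0))
--         t['hp'] = t.get('hp', 0) - hit
--         attackers -= hit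
--         damage += hit
--         if t.get('hp', 0) <= 0:
--             destroyed.append((t.get('x'), t.get('y')))
--     # Remove destroyed
--     defenses[:] = [t for t in defenses if t.get('hp', 0) > 0]
--     return attackers, destroyed, damage
-- ===== SOURCE B (Python) =====
-- from itertools import accumulate
--
-- def apply_attack_to_defenses(attackers, defenses):
--     """Prefix-sum formulation: the remaining-attacker sequence after tower i is
--     rem[i] = max(attackers, S_1..S_{i+1}) - S_{i+1} (S = prefix sums of hp), since
--     remaining evolves as r -> max(0, r - hp).  The processed-prefix length k, the
--     destroyed list (towers with hp <= remaining-before), the mutation and the total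
--     damage (attackers - rem[k-1]) are all read off from that data in staged passes.
--     Mutates defenses like A. Returns (remaining_attackers, destroyed_positions, total_damage)."""
--     if attackers <= 0 or not defenses:
--         return attackers, [], 0
--     hps = [t.get('hp', 0) for t in defenses]
--     prefix = list(accumulate(hps))
--     peaks = list(accumulate(prefix, max, initial=attackers))[1:]
--     rem = [m - s for m, s in zip(peaks, prefix)]
--     k = next((i + 1 for i, r in enumerate(rem) if r <= 0), len(defenses))
--     before = [attackers] + rem[:k - 1]
--     destroyed = [(t.get('x'), t.get('y'))
--                  for t, hp, r in zip(defenses, hps, before)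
--                  if hp <= r]
--     for t, hp, r in zip(defenses, hps, before):
--         t['hp'] = hp - min(r, hp)
--     remaining = rem[k - 1]
--     damage = attackers - remaining
--     defenses[:] = [t for t in defenses if t.get('hp', 0) > 0]
--     return remaining, destroyed, damage
-- ===== Notes on version B (the rewrite author's own statement) =====
-- stated objective: alternative
-- what changed: Replaces A's sequential damage loop (break + per-tower min/mutate + trailing filter) with a staged prefix-sum formulation: prefix sums and a running max give the remaining-attackers sequence in closed form, and the cut point, destroyed list and total damage (attackers - rem[k-1]) are read off from that data in separate passes.
import Mathlib
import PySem

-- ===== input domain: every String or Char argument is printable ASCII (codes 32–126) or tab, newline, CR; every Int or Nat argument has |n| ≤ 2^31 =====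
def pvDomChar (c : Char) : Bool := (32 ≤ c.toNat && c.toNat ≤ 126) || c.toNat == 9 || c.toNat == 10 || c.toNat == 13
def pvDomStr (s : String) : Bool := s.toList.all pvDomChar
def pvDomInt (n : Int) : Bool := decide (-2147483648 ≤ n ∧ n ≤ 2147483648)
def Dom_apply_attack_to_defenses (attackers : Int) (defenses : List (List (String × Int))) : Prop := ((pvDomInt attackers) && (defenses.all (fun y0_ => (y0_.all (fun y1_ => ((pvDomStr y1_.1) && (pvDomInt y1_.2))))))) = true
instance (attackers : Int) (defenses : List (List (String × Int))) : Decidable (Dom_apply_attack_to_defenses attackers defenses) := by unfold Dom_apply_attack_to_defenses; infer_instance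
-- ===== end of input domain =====

-- B replaces A's sequential damage loop by a staged prefix-sum formulation: the
-- remaining-attacker sequence is obtained in closed form from prefix sums and a running
-- max, and the cut point, destroyed list and total damage are read off from that data
-- (objective: alternative, same cost). Both Pythons mutate `defenses` in place in the
-- same way; the equivalence proved here is about the RETURN value only — the
-- `t['hp'] = …` / `defenses[:] = …` mutations never affect the returned triple, so
-- neither port models them.

-- ===== PORT A =====
-- A's for-loop with its break, over the towers (each a dict, ported as PySem.Dict over the assoc list).
def pvALoop (attackers : Int) (ts : List (List (String × Int)))
    (destroyed : List (Option Int × Option Int)) (damage : Int) :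
    Int × (List (Option Int × Option Int)) × Int :=
  match ts with
  | [] => (attackers, destroyed, damage)
  | t :: rest =>
    if attackers ≤ 0 then (attackers, destroyed, damage)   -- 'if attackers <= 0: break'
    else
      let d : PySem.Dict String Int := ⟨t⟩
      let hit := min attackers (d.getD "hp" 0)
      let d' := d.insert "hp" (d.getD "hp" 0 - hit)        -- t['hp'] = t.get('hp',0) - hit
      let destroyed' := if d'.getD "hp" 0 ≤ 0
        then destroyed ++ [(d'.get? "x", d'.get? "y")] else destroyed
      pvALoop (attackers - hit) rest destroyed' (damage + hit)

def apply_attack_to_defenses (attackers : Int) (defenses : List (List (String × Int))) :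
    Int × (List (Option Int × Option Int)) × Int :=
  if attackers ≤ 0 ∨ defenses = [] then (attackers, [], 0)
  else pvALoop attackers defenses [] 0

-- ===== PORT B =====
-- Source B's staged passes: hps, prefix sums, running max (accumulate(prefix, max, initial)),
-- rem, cut point k, before-list, destroyed comprehension, rem[k-1].
def pvGetHp (t : List (String × Int)) : Int := (⟨t⟩ : PySem.Dict String Int).getD "hp" 0

-- list(accumulate(hps)) with running total c
def pvAccSum (c : Int) : List Int → List Int
  | [] => []
  | h :: r => (c + h) :: pvAccSum (c + h) r

-- list(accumulate(prefix, max, initial=m))[1:]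
def pvAccMax (m : Int) : List Int → List Int
  | [] => []
  | h :: r => (max m h) :: pvAccMax (max m h) r

-- rem = [m - s for m, s in zip(peaks, prefix)]
def pvRem (attackers : Int) (defenses : List (List (String × Int))) : List Int :=
  let hps := defenses.map pvGetHp
  let prefx := pvAccSum 0 hps
  let peaks := pvAccMax attackers prefx
  List.zipWith (fun m s => m - s) peaks prefx

-- the staged computation Source B performs when attackers > 0 and defenses ≠ []
def pvBCore (attackers : Int) (defenses : List (List (String × Int))) :
    Int × (List (Option Int × Option Int)) × Int :=
  let hps := defenses.map pvGetHp
  let rem := pvRem attackers defenses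
  let k : Nat := match rem.findIdx? (fun r => decide (r ≤ 0)) with   -- next((i+1 …), len(defenses))
    | some i => i + 1
    | none => defenses.length
  let before := attackers :: rem.take (k - 1)
  let destroyed := ((defenses.zip hps).zip before).filterMap
    (fun p => if p.1.2 ≤ p.2
      then some ((⟨p.1.1⟩ : PySem.Dict String Int).get? "x", (⟨p.1.1⟩ : PySem.Dict String Int).get? "y")
      else none)
  let remaining := rem.getD (k - 1) 0    -- rem[k-1]; here 1 ≤ k ≤ rem.length, so in range
  (remaining, destroyed, attackers - remaining)

def apply_attack_to_defenses_alt (attackers : Int) (defenses : List (List (String × Int))) :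
    Int × (List (Option Int × Option Int)) × Int :=
  if attackers ≤ 0 ∨ defenses = [] then (attackers, [], 0)
  else pvBCore attackers defenses

-- ===== PRECONDITION & SPEC =====
def Spec_apply_attack_to_defenses (attackers : Int) (defenses : List (List (String × Int))) (out : Int × (List (Option Int × Option Int)) × Int) : Prop := out = apply_attack_to_defenses_alt attackers defenses
instance (attackers : Int) (defenses : List (List (String × Int))) (out : Int × (List (Option Int × Option Int)) × Int) : Decidable (Spec_apply_attack_to_defenses attackers defenses out) := by unfold Spec_apply_attack_to_defenses; infer_instance

-- ===== CLAIM (what is proved, stated in full; the proofs are below) =====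
def Claim_equal_apply_attack_to_defenses : Prop := ∀ (attackers : Int) (defenses : List (List (String × Int))), Dom_apply_attack_to_defenses attackers defenses → Spec_apply_attack_to_defenses attackers defenses (apply_attack_to_defenses attackers defenses)

-- ===== LEMMAS AND PROOFS =====

-- the head contribution to the destroyed list
def pvDelta (a : Int) (t : List (String × Int)) : List (Option Int × Option Int) :=
  if pvGetHp t ≤ a
    then [((⟨t⟩ : PySem.Dict String Int).get? "x", (⟨t⟩ : PySem.Dict String Int).get? "y")]
    else []

theorem pvAccSum_shift : ∀ (l : List Int) (c d : Int), pvAccSum (c + d) l = (pvAccSum c l).map (· + d)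
  | [], _, _ => rfl
  | h :: r, c, d => by
    simp only [pvAccSum, List.map_cons]
    rw [show c + d + h = c + h + d by ring, pvAccSum_shift r (c + h) d]

theorem pvAccMax_shift : ∀ (l : List Int) (m d : Int), pvAccMax (m + d) (l.map (· + d)) = (pvAccMax m l).map (· + d)
  | [], _, _ => rfl
  | h :: r, m, d => by
    simp only [pvAccMax, List.map_cons]
    rw [show max (m + d) (h + d) = max m h + d by omega, pvAccMax_shift r (max m h) d]

theorem pvZipSub_map : ∀ (p q : List Int) (d : Int),
    List.zipWith (fun m s => m - s) (p.map (· + d)) (q.map (· + d)) = List.zipWith (fun m s => m - s) p q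
  | [], _, _ => rfl
  | _ :: _, [], _ => rfl
  | x :: p, y :: q, d => by
    simp only [List.map_cons, List.zipWith_cons_cons]
    rw [show x + d - (y + d) = x - y by ring, pvZipSub_map p q d]

theorem pvRem_cons (a : Int) (t : List (String × Int)) (ts : List (List (String × Int))) :
    pvRem a (t :: ts) =
      (max a (pvGetHp t) - pvGetHp t) :: pvRem (max a (pvGetHp t) - pvGetHp t) ts := by
  unfold pvRem
  simp only [List.map_cons, pvAccSum, zero_add]
  have e1 : pvAccSum (pvGetHp t) (ts.map pvGetHp)
      = (pvAccSum 0 (ts.map pvGetHp)).map (· + pvGetHp t) := by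
    have := pvAccSum_shift (ts.map pvGetHp) 0 (pvGetHp t)
    simpa using this
  rw [e1]
  simp only [pvAccMax]
  have e2 : pvAccMax (max a (pvGetHp t)) ((pvAccSum 0 (ts.map pvGetHp)).map (· + pvGetHp t))
      = (pvAccMax (max a (pvGetHp t) - pvGetHp t) (pvAccSum 0 (ts.map pvGetHp))).map (· + pvGetHp t) := by
    have := pvAccMax_shift (pvAccSum 0 (ts.map pvGetHp)) (max a (pvGetHp t) - pvGetHp t) (pvGetHp t)
    rw [show max a (pvGetHp t) - pvGetHp t + pvGetHp t = max a (pvGetHp t) by ring] at this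
    exact this
  rw [e2]
  simp only [List.zipWith_cons_cons, pvZipSub_map]

-- core on a one-tower list
theorem pvBCore_single (a : Int) (t : List (String × Int)) :
    pvBCore a [t] = (max a (pvGetHp t) - pvGetHp t, pvDelta a t, a - (max a (pvGetHp t) - pvGetHp t)) := by
  unfold pvBCore pvDelta
  rw [pvRem_cons]
  have hnil : pvRem (max a (pvGetHp t) - pvGetHp t) ([] : List (List (String × Int))) = [] := rfl
  rw [hnil]
  by_cases ha' : max a (pvGetHp t) - pvGetHp t ≤ 0 <;>
    simp [List.findIdx?_cons, ha'] <;> by_cases hd : pvGetHp t ≤ a <;> simp [hd]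

-- core when the head exhausts the attackers (remaining after t is ≤ 0): one tower processed
theorem pvBCore_stop (a : Int) (t u : List (String × Int)) (rs : List (List (String × Int)))
    (ha' : max a (pvGetHp t) - pvGetHp t ≤ 0) :
    pvBCore a (t :: u :: rs) = (max a (pvGetHp t) - pvGetHp t, pvDelta a t, a - (max a (pvGetHp t) - pvGetHp t)) := by
  unfold pvBCore pvDelta
  rw [pvRem_cons]
  simp [List.findIdx?_cons, ha']
  by_cases hd : pvGetHp t ≤ a <;> simp [hd]

-- core when attackers survive the head: peel one tower off the staged data
theorem pvBCore_go (a : Int) (t u : List (String × Int)) (rs : List (List (String × Int)))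
    (ha' : 0 < max a (pvGetHp t) - pvGetHp t) :
    pvBCore a (t :: u :: rs) =
      ((pvBCore (max a (pvGetHp t) - pvGetHp t) (u :: rs)).1,
       pvDelta a t ++ (pvBCore (max a (pvGetHp t) - pvGetHp t) (u :: rs)).2.1,
       a - (pvBCore (max a (pvGetHp t) - pvGetHp t) (u :: rs)).1) := by
  unfold pvBCore pvDelta
  rw [pvRem_cons]
  have hfalse : ¬ (max a (pvGetHp t) - pvGetHp t ≤ 0) := by omega
  rcases hIdx : (pvRem (max a (pvGetHp t) - pvGetHp t) (u :: rs)).findIdx? (fun r => decide (r ≤ 0)) with _ | i <;>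
    simp [List.findIdx?_cons, hfalse, hIdx] <;>
    by_cases hd : pvGetHp t ≤ a <;> simp [hd]

-- A's per-tower destroyed contribution equals pvDelta
theorem pvDeltaA (a : Int) (t : List (String × Int))
    (destroyed : List (Option Int × Option Int)) :
    (if ((⟨t⟩ : PySem.Dict String Int).insert "hp"
          ((⟨t⟩ : PySem.Dict String Int).getD "hp" 0 - min a ((⟨t⟩ : PySem.Dict String Int).getD "hp" 0))).getD "hp" 0 ≤ 0
      then destroyed ++ [(((⟨t⟩ : PySem.Dict String Int).insert "hp"
              ((⟨t⟩ : PySem.Dict String Int).getD "hp" 0 - min a ((⟨t⟩ : PySem.Dict String Int).getD "hp" 0))).get? "x",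
            ((⟨t⟩ : PySem.Dict String Int).insert "hp"
              ((⟨t⟩ : PySem.Dict String Int).getD "hp" 0 - min a ((⟨t⟩ : PySem.Dict String Int).getD "hp" 0))).get? "y")]
      else destroyed)
    = destroyed ++ pvDelta a t := by
  have hx : ("x" : String) ≠ "hp" := by decide
  have hy : ("y" : String) ≠ "hp" := by decide
  rw [PySem.Dict.getD_insert, PySem.Dict.get?_insert_of_ne _ _ hx, PySem.Dict.get?_insert_of_ne _ _ hy]
  unfold pvDelta pvGetHp
  by_cases hd : (⟨t⟩ : PySem.Dict String Int).getD "hp" 0 ≤ a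
  · rw [if_pos (by simp; omega), if_pos hd]
  · rw [if_neg (by simp; omega), if_neg hd, List.append_nil]

-- the third component of the core is attackers minus the first
theorem pvBCore_damage (a : Int) (ds : List (List (String × Int))) :
    (pvBCore a ds).2.2 = a - (pvBCore a ds).1 := rfl

-- A's loop equals B's staged core, for any accumulator state
theorem pvLoop_eq_core : ∀ (rest : List (List (String × Int))) (t : List (String × Int)) (a : Int)
    (dest : List (Option Int × Option Int)) (dam : Int), 0 < a →
    pvALoop a (t :: rest) dest dam =
      ((pvBCore a (t :: rest)).1, dest ++ (pvBCore a (t :: rest)).2.1, dam + (pvBCore a (t :: rest)).2.2) := by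
  intro rest
  induction rest with
  | nil =>
    intro t a dest dam ha
    rw [pvBCore_single]
    simp only [pvALoop, if_neg (by omega : ¬ a ≤ 0)]
    rw [pvDeltaA a t dest]
    refine Prod.ext ?_ (Prod.ext ?_ ?_) <;> simp <;> (try unfold pvGetHp) <;> omega
  | cons u rs ih =>
    intro t a dest dam ha
    conv_lhs => rw [pvALoop]
    rw [if_neg (by omega : ¬ a ≤ 0)]
    dsimp only
    rw [pvDeltaA a t dest]
    have hrem : a - min a ((⟨t⟩ : PySem.Dict String Int).getD "hp" 0) = max a (pvGetHp t) - pvGetHp t := by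
      unfold pvGetHp; omega
    rw [hrem]
    by_cases ha' : max a (pvGetHp t) - pvGetHp t ≤ 0
    · -- the loop breaks at the next tower
      rw [pvBCore_stop a t u rs ha']
      conv_lhs => rw [pvALoop]
      rw [if_pos ha']
      refine Prod.ext ?_ (Prod.ext ?_ ?_) <;> simp <;> (try unfold pvGetHp) <;> omega
    · rw [ih u (max a (pvGetHp t) - pvGetHp t) (dest ++ pvDelta a t) (dam + min a ((⟨t⟩ : PySem.Dict String Int).getD "hp" 0)) (by omega)]
      rw [pvBCore_go a t u rs (by omega)]
      rw [pvBCore_damage]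
      refine Prod.ext ?_ (Prod.ext ?_ ?_) <;> simp [List.append_assoc] <;> (try unfold pvGetHp) <;> omega

-- ===== VERDICT (by name: the statement is the Claim_ definition above) =====
theorem apply_attack_to_defenses_spec : Claim_equal_apply_attack_to_defenses := by
  intro a ds _
  show apply_attack_to_defenses a ds = apply_attack_to_defenses_alt a ds
  unfold apply_attack_to_defenses apply_attack_to_defenses_alt
  by_cases hg : a ≤ 0 ∨ ds = []
  · rw [if_pos hg, if_pos hg]
  · rw [if_neg hg, if_neg hg]
    rw [not_or] at hg
    obtain ⟨ha, hds⟩ := hg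
    cases ds with
    | nil => exact absurd rfl hds
    | cons t rest =>
      rw [pvLoop_eq_core rest t a [] 0 (by omega)]
      simp
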